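-- pv_equiv track=rewrite | github.com/anku94/amr | scripts/tau_analysis/analyze_by_label.py | get_key_data
-- ===== SOURCE A (Python) =====
-- def sparse_to_dense(d, max_len, def_val):
--     return [
--         d[i] if i in d else def_val for i in range(max_len)
--     ]
--
-- def get_key_data(all_data, key, def_val):
--     max_ts = 0
--     for label_data in all_data:
--         key_data = label_data[key]
--         max_ts_alt = max(key_data.keys())
--         max_ts = max(max_ts, max_ts_alt)
--
--     # uniform-ize
--     all_uf_key_data = []
--     for label_data in all_data:
--         key_data = label_data[key]
--         uf_key_data = sparse_to_dense(key_data, max_ts, def_val)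
--         all_uf_key_data.append(uf_key_data)
--
--     return all_uf_key_data
-- ===== SOURCE B (Python) =====
-- def get_key_data(all_data, key, def_val):
--     # prefetch the per-label dicts (KeyError fires here if key is missing)
--     dicts = [label_data[key] for label_data in all_data]
--
--     # running-max scan over all keys (no per-dict max() call)
--     max_ts = 0
--     for d in dicts:
--         for k in d:
--             if k > max_ts:
--                 max_ts = k
--
--     # densify by SCATTER: allocate the dense row, write only the in-range sparse entries
--     result = []
--     for d in dicts:
--         dense = [def_val] * max_ts
--         for k, v in d.items():
--             if 0 <= k < max_ts:
--                 dense[k] = v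
--         result.append(dense)
--     return result
-- ===== Notes on version B (the rewrite author's own statement) =====
-- stated objective: alternative
-- what changed: B prefetches the per-label dicts once, replaces the per-dict max() calls by one flat running-max scan over all keys, and inverts the densification from a gather (membership test at every index of range(max_ts)) into a scatter (allocate [def_val]*max_ts, write only the in-range dict entries).
import Mathlib
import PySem

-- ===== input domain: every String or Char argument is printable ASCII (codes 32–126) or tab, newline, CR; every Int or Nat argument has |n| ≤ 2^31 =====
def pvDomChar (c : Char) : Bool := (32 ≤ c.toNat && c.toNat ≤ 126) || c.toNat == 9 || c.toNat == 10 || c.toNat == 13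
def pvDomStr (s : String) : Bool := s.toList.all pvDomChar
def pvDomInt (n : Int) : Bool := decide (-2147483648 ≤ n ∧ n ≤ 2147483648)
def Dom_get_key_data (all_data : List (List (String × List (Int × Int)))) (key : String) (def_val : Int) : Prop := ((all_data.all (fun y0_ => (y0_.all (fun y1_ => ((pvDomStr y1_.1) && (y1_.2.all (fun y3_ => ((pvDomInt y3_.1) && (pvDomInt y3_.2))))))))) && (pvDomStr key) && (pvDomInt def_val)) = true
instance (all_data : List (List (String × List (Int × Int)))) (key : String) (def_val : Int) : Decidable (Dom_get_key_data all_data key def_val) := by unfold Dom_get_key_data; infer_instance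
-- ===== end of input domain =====

-- B prefetches the per-label dicts, replaces the per-dict max() by one flat running-max scan over
-- all keys, and densifies by scatter (allocate [def_val]*max_ts, write the in-range entries) instead
-- of a gather with a membership test at every index.


-- ===== PORT A =====
-- label_data[key] on a dict (assoc list with unique keys) = first match; Pre_ excludes the
-- KeyError (key absent) and the ValueError of max() on an empty dict (the `none` branches
-- are unreachable under Pre_).
def pvMaxTs (all_data : List (List (String × List (Int × Int)))) (key : String) : Int :=
  all_data.foldl (fun max_ts label_data =>
    match label_data.find? (fun p => p.1 == key) with
    | none => max_ts                       -- Python: KeyError (excluded by Pre_)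
    | some p =>
      match PySem.List.max? (p.2.map Prod.fst) (fun x => x) with
      | none => max_ts                     -- Python: ValueError (excluded by Pre_)
      | some max_ts_alt => max max_ts max_ts_alt) 0

def sparse_to_dense (d : List (Int × Int)) (max_len : Int) (def_val : Int) : List Int :=
  (PySem.List.pyRange 0 max_len 1).map (fun i =>
    match d.find? (fun p => p.1 == i) with   -- `d[i] if i in d else def_val`
    | some p => p.2
    | none => def_val)

def get_key_data (all_data : List (List (String × List (Int × Int)))) (key : String) (def_val : Int) : List (List Int) :=
  let max_ts := pvMaxTs all_data key
  all_data.foldl (fun acc label_data =>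
    match label_data.find? (fun p => p.1 == key) with
    | none => acc                          -- Python: KeyError (excluded by Pre_)
    | some p => acc ++ [sparse_to_dense p.2 max_ts def_val]) []

-- ===== PORT B =====
-- `label_data[key]`; the KeyError of a missing key is excluded by Pre_ (getD [] is unreachable)
def pvDictOf (label_data : List (String × List (Int × Int))) (key : String) : List (Int × Int) :=
  ((label_data.find? (fun p => p.1 == key)).map Prod.snd).getD []

-- `for k in d: if k > max_ts: max_ts = k`
def pvRowScan (d : List (Int × Int)) (max_ts : Int) : Int :=
  d.foldl (fun max_ts p => if p.1 > max_ts then p.1 else max_ts) max_ts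

-- `dense = [def_val] * max_ts; for k, v in d.items(): if 0 <= k < max_ts: dense[k] = v`
def pvDense (d : List (Int × Int)) (max_ts : Int) (def_val : Int) : List Int :=
  d.foldl (fun dense p =>
      if 0 ≤ p.1 ∧ p.1 < max_ts then dense.set p.1.toNat p.2 else dense)
    (List.replicate max_ts.toNat def_val)

def get_key_data_alt (all_data : List (List (String × List (Int × Int)))) (key : String) (def_val : Int) : List (List Int) :=
  let dicts := all_data.map (fun label_data => pvDictOf label_data key)
  let max_ts := dicts.foldl (fun max_ts d => pvRowScan d max_ts) 0
  dicts.map (fun d => pvDense d max_ts def_val)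

-- ===== PRECONDITION & SPEC =====
-- Every label_data must contain `key` (else Python raises KeyError) and that inner dict must be
-- nonempty (else A's max() raises ValueError); its keys must be distinct — an assoc list with
-- duplicate int keys does not represent any Python dict, so nothing a Python input could reach
-- is excluded by that conjunct.
def Pre_get_key_data (all_data : List (List (String × List (Int × Int)))) (key : String) (def_val : Int) : Prop :=
  (all_data.all (fun label_data =>
    match label_data.find? (fun p => p.1 == key) with
    | none => false
    | some p => decide (p.2 ≠ [] ∧ (p.2.map Prod.fst).Nodup))) = true
instance (all_data : List (List (String × List (Int × Int)))) (key : String) (def_val : Int) : Decidable (Pre_get_key_data all_data key def_val) := by unfold Pre_get_key_data; infer_instance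

def pvWitness_get_key_data : (List (List (String × List (Int × Int)))) × String × Int :=
  ([[("a", [(0, 5), (2, 6)])], [("a", [(1, 4)]), ("b", [(0, 1)])]], "a", 7)

def Spec_get_key_data (all_data : List (List (String × List (Int × Int)))) (key : String) (def_val : Int) (out : List (List Int)) : Prop := out = get_key_data_alt all_data key def_val
instance (all_data : List (List (String × List (Int × Int)))) (key : String) (def_val : Int) (out : List (List Int)) : Decidable (Spec_get_key_data all_data key def_val out) := by unfold Spec_get_key_data; infer_instance

-- ===== CLAIM (what is proved, stated in full; the proofs are below) =====
def Claim_equal_get_key_data : Prop := ∀ (all_data : List (List (String × List (Int × Int)))) (key : String) (def_val : Int), Dom_get_key_data all_data key def_val → Pre_get_key_data all_data key def_val → Spec_get_key_data all_data key def_val (get_key_data all_data key def_val)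

-- ===== LEMMAS AND PROOFS =====

theorem le_pvMaxTs_aux (key : String) :
    ∀ (l : List (List (String × List (Int × Int)))) (mt : Int),
      mt ≤ l.foldl (fun max_ts label_data =>
        match label_data.find? (fun p => p.1 == key) with
        | none => max_ts
        | some p =>
          match PySem.List.max? (p.2.map Prod.fst) (fun x => x) with
          | none => max_ts
          | some max_ts_alt => max max_ts max_ts_alt) mt := by
  intro l
  induction l with
  | nil => intro mt; simp
  | cons hd tl ih =>
    intro mt
    refine le_trans ?_ (ih _)
    cases hhd : hd.find? (fun p => p.1 == key) with
    | none => simp [hhd]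
    | some p =>
      cases hm : PySem.List.max? (p.2.map Prod.fst) (fun x => x) with
      | none => simp [hhd, hm]
      | some m => simp [hhd, hm]

theorem pvMaxTs_nonneg (all_data : List (List (String × List (Int × Int)))) (key : String) :
    0 ≤ pvMaxTs all_data key := le_pvMaxTs_aux key all_data 0

-- running `max` pulled out of the fold
theorem foldl_max_pull (l : List Int) : ∀ (a b : Int),
    l.foldl max (max a b) = max a (l.foldl max b) := by
  induction l with
  | nil => intro a b; rfl
  | cons x t ih =>
    intro a b
    simp only [List.foldl_cons, max_assoc, ih]

-- B's running-max scan of one dict = `max acc (max(d.keys()))` for a nonempty dict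
theorem pvRowScan_eq_max (d : List (Int × Int)) (acc : Int) (hne : d ≠ []) :
    ∀ m, PySem.List.max? (d.map Prod.fst) (fun x => x) = some m →
      pvRowScan d acc = max acc m := by
  obtain ⟨x, t, rfl⟩ := List.exists_cons_of_ne_nil hne
  intro m hm
  rw [List.map_cons, PySem.List.max?_id_cons, Option.some_inj] at hm
  unfold pvRowScan
  have hstep : ∀ (mt : Int) (p : Int × Int),
      (if p.1 > mt then p.1 else mt) = max mt p.1 := by
    intro mt p; rcases le_or_gt p.1 mt with h | h <;> simp [h] <;> omega
  have hfold : ∀ (l : List (Int × Int)) (a : Int),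
      l.foldl (fun mt p => if p.1 > mt then p.1 else mt) a = (l.map Prod.fst).foldl max a := by
    intro l
    induction l with
    | nil => intro a; rfl
    | cons y s ih =>
      intro a
      rw [List.foldl_cons, List.map_cons, List.foldl_cons, hstep a y, ih]
  rw [hfold, List.map_cons, List.foldl_cons, foldl_max_pull, hm]

-- phase 1 agrees: A's per-dict max() fold = B's flat running-max scan, under Pre_
theorem maxts_agree (key : String) :
    ∀ (l : List (List (String × List (Int × Int)))) (acc : Int),
      (l.all (fun label_data =>
        match label_data.find? (fun p => p.1 == key) with
        | none => false
        | some p => decide (p.2 ≠ [] ∧ (p.2.map Prod.fst).Nodup))) = true →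
      l.foldl (fun max_ts label_data =>
        match label_data.find? (fun p => p.1 == key) with
        | none => max_ts
        | some p =>
          match PySem.List.max? (p.2.map Prod.fst) (fun x => x) with
          | none => max_ts
          | some max_ts_alt => max max_ts max_ts_alt) acc =
      (l.map (fun label_data => pvDictOf label_data key)).foldl
        (fun max_ts d => pvRowScan d max_ts) acc := by
  intro l
  induction l with
  | nil => intro acc _; rfl
  | cons hd tl ih =>
    intro acc hall
    simp only [List.all_cons, Bool.and_eq_true] at hall
    obtain ⟨hhd, htl⟩ := hall
    cases hfind : hd.find? (fun p => p.1 == key) with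
    | none => rw [hfind] at hhd; exact absurd hhd (by simp)
    | some p =>
      rw [hfind] at hhd
      simp only [decide_eq_true_eq] at hhd
      cases hm : PySem.List.max? (p.2.map Prod.fst) (fun x => x) with
      | none =>
        have : p.2.map Prod.fst = [] := (PySem.List.max?_eq_none_iff _ _).mp hm
        exact absurd (List.map_eq_nil_iff.mp this) hhd.1
      | some m =>
        simp only [List.map_cons, List.foldl_cons, hfind, hm]
        rw [ih _ htl]
        have : pvRowScan (pvDictOf hd key) acc = max acc m := by
          unfold pvDictOf; rw [hfind]
          exact pvRowScan_eq_max p.2 acc hhd.1 m hm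
        rw [this]

-- the scatter loop, read off position by position
theorem pvDense_getElem? (n : Nat) :
    ∀ (d : List (Int × Int)) (dense : List Int), (d.map Prod.fst).Nodup →
      dense.length = n → ∀ (j : Nat),
      (d.foldl (fun dense p =>
          if 0 ≤ p.1 ∧ p.1 < (n : Int) then dense.set p.1.toNat p.2 else dense) dense)[j]? =
        match d.find? (fun p => p.1 == (j : Int)) with
        | some p => if j < n then some p.2 else none
        | none => dense[j]? := by
  intro d
  induction d with
  | nil => intro dense _ _ j; simp
  | cons hd tl ih =>
    intro dense hnd hlen j
    simp only [List.map_cons, List.nodup_cons] at hnd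
    have hlen' : (if 0 ≤ hd.1 ∧ hd.1 < (n : Int) then dense.set hd.1.toNat hd.2 else dense).length = n := by
      split <;> simp [hlen]
    rw [List.foldl_cons, ih _ hnd.2 hlen' j]
    by_cases hk : hd.1 = (j : Int)
    · have hfindtl : tl.find? (fun p => p.1 == (j : Int)) = none := by
        rw [List.find?_eq_none]
        intro p hp
        simp only [beq_iff_eq]
        intro hpj
        exact hnd.1 (hk ▸ hpj ▸ (List.mem_map_of_mem hp))
      rw [hfindtl, List.find?_cons_of_pos (by simpa using hk)]
      show (if 0 ≤ hd.1 ∧ hd.1 < (n : Int) then dense.set hd.1.toNat hd.2 else dense)[j]?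
         = if j < n then some hd.2 else none
      by_cases hj : j < n
      · rw [if_pos hj, if_pos (show (0 : Int) ≤ hd.1 ∧ hd.1 < (n : Int) by omega)]
        have ht : hd.1.toNat = j := by omega
        rw [ht, List.getElem?_set_self (by omega)]
      · rw [if_neg hj, if_neg (show ¬ ((0 : Int) ≤ hd.1 ∧ hd.1 < (n : Int)) by omega)]
        rw [List.getElem?_eq_none (by omega)]
    · rw [List.find?_cons_of_neg (by simpa using hk)]
      cases htl : tl.find? (fun p => p.1 == (j : Int)) with
      | some p => rfl
      | none =>
        by_cases hg : (0 : Int) ≤ hd.1 ∧ hd.1 < (n : Int)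
        · rw [if_pos hg, List.getElem?_set_ne (by omega)]
        · rw [if_neg hg]

-- scatter = gather on a dict with distinct keys
theorem pvDense_eq_sparse_to_dense (d : List (Int × Int)) (max_ts def_val : Int)
    (hnd : (d.map Prod.fst).Nodup) (hmt : 0 ≤ max_ts) :
    pvDense d max_ts def_val = sparse_to_dense d max_ts def_val := by
  obtain ⟨n, rfl⟩ : ∃ n : Nat, max_ts = (n : Int) :=
    ⟨max_ts.toNat, (Int.toNat_of_nonneg hmt).symm⟩
  apply List.ext_getElem?
  intro j
  unfold pvDense sparse_to_dense
  rw [show ((n : Int)).toNat = n from Int.toNat_natCast n]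
  rw [pvDense_getElem? n d _ hnd (by simp) j]
  rw [PySem.List.pyRange_one]
  simp only [sub_zero, Int.toNat_natCast, zero_add, List.map_map, List.getElem?_map]
  by_cases hj : j < n
  · rw [List.getElem?_range hj]
    cases hfind : d.find? (fun p => p.1 == (j : Int)) with
    | some p => simp [hfind, hj]
    | none => simp [hfind, hj, Function.comp]
  · rw [List.getElem?_eq_none (by simpa using hj)]
    cases hfind : d.find? (fun p => p.1 == (j : Int)) with
    | some p => simp [hj]
    | none => simp [hj]

-- A's append loop collapses to a map over the prefetched dicts, under Pre_
theorem phase2_eq_map (key : String) (f : List (Int × Int) → List Int) :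
    ∀ (l : List (List (String × List (Int × Int)))) (acc : List (List Int)),
      (∀ label_data ∈ l, (label_data.find? (fun p => p.1 == key)).isSome) →
      l.foldl (fun acc label_data =>
        match label_data.find? (fun p => p.1 == key) with
        | none => acc
        | some p => acc ++ [f p.2]) acc =
      acc ++ l.map (fun label_data => f (pvDictOf label_data key)) := by
  intro l
  induction l with
  | nil => intro acc _; simp
  | cons hd tl ih =>
    intro acc hall
    cases hfind : hd.find? (fun p => p.1 == key) with
    | none => exact absurd (hall hd (by simp)) (by simp [hfind])
    | some p =>
      simp only [List.foldl_cons, List.map_cons, hfind]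
      rw [ih _ (fun ld h => hall ld (List.mem_cons_of_mem _ h))]
      simp [pvDictOf, hfind]

-- ===== VERDICT (by name: the statement is the Claim_ definition above) =====
theorem get_key_data_spec : Claim_equal_get_key_data := by
  intro all_data key def_val _ hpre
  unfold Spec_get_key_data
  dsimp only [get_key_data, get_key_data_alt]
  unfold Pre_get_key_data at hpre
  have hpre' := hpre
  rw [List.all_eq_true] at hpre'
  have hsome : ∀ label_data ∈ all_data, (label_data.find? (fun p => p.1 == key)).isSome := by
    intro ld hld
    have h := hpre' ld hld
    cases hfind : ld.find? (fun p => p.1 == key) with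
    | none => rw [hfind] at h; exact absurd h (by simp)
    | some p => simp
  have hmt : pvMaxTs all_data key =
      (all_data.map (fun label_data => pvDictOf label_data key)).foldl
        (fun max_ts d => pvRowScan d max_ts) 0 := maxts_agree key all_data 0 hpre
  rw [phase2_eq_map key (fun d => sparse_to_dense d (pvMaxTs all_data key) def_val) all_data [] hsome, List.nil_append, ← hmt, List.map_map]
  apply List.map_congr_left
  intro ld hld
  have h := hpre' ld hld
  simp only [Function.comp]
  cases hfind : ld.find? (fun p => p.1 == key) with
  | none => rw [hfind] at h; exact absurd h (by simp)
  | some p =>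
    rw [hfind] at h
    simp only [decide_eq_true_eq] at h
    rw [show pvDictOf ld key = p.2 by simp [pvDictOf, hfind]]
    exact (pvDense_eq_sparse_to_dense p.2 _ def_val h.2 (pvMaxTs_nonneg all_data key)).symm
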